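-- pv_equiv track=rewrite | github.com/michaeljthacker/mjt-wordsearch-ui | archive/OLD_CODE_word_search.py | _contains_banned_word
-- ===== SOURCE A (Python) =====
-- _BANNED_WORDS: list[str] = [
--     "FUCK", "SHIT", "BITCH", "ASSHOLE", "DICK", "COCK", "PUSSY", "CUNT",
--     "NIGGER", "FAGGOT", "BASTARD", "SLUT", "WHORE", "CRAP", "JIZZ", "HOE",
--     "PISS", "TITS", "JERK", "WANKER", "DOUCHE", "ASS", "FART", "BLOWJOB",
--     "ANUS", "PRICK", "POO", "BUTT", "SCROTUM", "DILDO", "BOOBS", "WEINER",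
--     "FREAK", "RETARD", "LOSER", "SUCK", "TURD", "DARN", "PEE", "DONG",
--     "DAMN", "HELL", "CLIT", "NUT", "RAPE", "SEXY", "PORN", "DRUG",
-- ]
--
-- def _extract_lines(grid: list[list[str]]) -> list[str]:
--     """Extract all rows, columns, and diagonals from the grid as strings."""
--     size = len(grid)
--     lines: list[str] = []
--
--     # Rows
--     for row in grid:
--         lines.append("".join(row))
--
--     # Columns
--     for col in range(size):
--         lines.append("".join(grid[row][col] for row in range(size)))
--
--     # Diagonals (top-left to bottom-right)
--     for start in range(-(size - 1), size):
--         diag = []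
--         for i in range(size):
--             r, c = i, i - start
--             if 0 <= r < size and 0 <= c < size:
--                 diag.append(grid[r][c])
--         if diag:
--             lines.append("".join(diag))
--
--     # Diagonals (top-right to bottom-left)
--     for start in range(0, 2 * size - 1):
--         diag = []
--         for i in range(size):
--             r, c = i, start - i
--             if 0 <= r < size and 0 <= c < size:
--                 diag.append(grid[r][c])
--         if diag:
--             lines.append("".join(diag))
--
--     return lines
--
-- def _contains_banned_word(grid: list[list[str]]) -> bool:
--     """Check if the grid contains any banned word in any direction."""
--     for line in _extract_lines(grid):
--         forward = line
--         backward = line[::-1]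
--         for banned in _BANNED_WORDS:
--             if banned in forward or banned in backward:
--                 return True
--     return False
-- ===== SOURCE B (Python) =====
-- _BANNED_WORDS: list[str] = [
--     "FUCK", "SHIT", "BITCH", "ASSHOLE", "DICK", "COCK", "PUSSY", "CUNT",
--     "NIGGER", "FAGGOT", "BASTARD", "SLUT", "WHORE", "CRAP", "JIZZ", "HOE",
--     "PISS", "TITS", "JERK", "WANKER", "DOUCHE", "ASS", "FART", "BLOWJOB",
--     "ANUS", "PRICK", "POO", "BUTT", "SCROTUM", "DILDO", "BOOBS", "WEINER",
--     "FREAK", "RETARD", "LOSER", "SUCK", "TURD", "DARN", "PEE", "DONG",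
--     "DAMN", "HELL", "CLIT", "NUT", "RAPE", "SEXY", "PORN", "DRUG",
-- ]
--
--
-- def _contains_banned_word(grid: list[list[str]]) -> bool:
--     """Single nested pass over the cells: each cell is routed to its column,
--     main-diagonal (index r-c+size-1) and anti-diagonal (index r+c) bucket,
--     instead of four separate extraction loops."""
--     size = len(grid)
--     n_diag = 2 * size - 1 if size else 0
--     cols: list[list[str]] = [[] for _ in range(size)]
--     mains: list[list[str]] = [[] for _ in range(n_diag)]
--     antis: list[list[str]] = [[] for _ in range(n_diag)]
--     for r in range(size):
--         row = grid[r]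
--         for c in range(size):
--             ch = row[c]
--             cols[c].append(ch)
--             mains[r - c + size - 1].append(ch)
--             antis[r + c].append(ch)
--     lines = ["".join(row) for row in grid]
--     for group in (cols, mains, antis):
--         for cells in group:
--             lines.append("".join(cells))
--     return any(
--         banned in line or banned in line[::-1]
--         for line in lines
--         for banned in _BANNED_WORDS
--     )
-- ===== Notes on version B (the rewrite author's own statement) =====
-- stated objective: alternative
-- what changed: Replaces A's four separate extraction loops (rows, columns, two diagonal sweeps that scan all i with a bounds test per start) by one nested pass over the cells that routes each grid[r][c] into its column, main-diagonal (index r-c+size-1) and anti-diagonal (index r+c) bucket, then joins the buckets and runs the banned-word check.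
import Mathlib
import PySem

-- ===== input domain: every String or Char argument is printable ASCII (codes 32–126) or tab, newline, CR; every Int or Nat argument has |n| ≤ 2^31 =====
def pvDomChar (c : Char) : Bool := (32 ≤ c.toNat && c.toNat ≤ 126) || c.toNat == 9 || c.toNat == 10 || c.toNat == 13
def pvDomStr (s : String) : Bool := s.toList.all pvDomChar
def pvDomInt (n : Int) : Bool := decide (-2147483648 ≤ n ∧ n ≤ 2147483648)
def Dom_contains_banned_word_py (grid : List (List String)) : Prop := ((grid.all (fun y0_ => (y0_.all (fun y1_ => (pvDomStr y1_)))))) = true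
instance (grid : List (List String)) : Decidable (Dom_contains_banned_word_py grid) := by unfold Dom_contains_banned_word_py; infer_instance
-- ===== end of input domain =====

-- B replaces A's four extraction loops by one nested pass routing every cell to its
-- column / main-diagonal / anti-diagonal bucket (objective: alternative decomposition).

-- ===== PORT A =====
def pvBanned : List String := [
  "FUCK", "SHIT", "BITCH", "ASSHOLE", "DICK", "COCK", "PUSSY", "CUNT",
  "NIGGER", "FAGGOT", "BASTARD", "SLUT", "WHORE", "CRAP", "JIZZ", "HOE",
  "PISS", "TITS", "JERK", "WANKER", "DOUCHE", "ASS", "FART", "BLOWJOB",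
  "ANUS", "PRICK", "POO", "BUTT", "SCROTUM", "DILDO", "BOOBS", "WEINER",
  "FREAK", "RETARD", "LOSER", "SUCK", "TURD", "DARN", "PEE", "DONG",
  "DAMN", "HELL", "CLIT", "NUT", "RAPE", "SEXY", "PORN", "DRUG"]

-- grid[r][c] (indices are in range on every input Pre_ admits; default never read there)
def pvCell (grid : List (List String)) (r c : Int) : String :=
  PySem.List.pyGetD (PySem.List.pyGetD grid r []) c ""

def pvExtractLines (grid : List (List String)) : List String :=
  let size : Int := grid.length
  let lines : List String := grid.foldl (fun acc row => acc ++ [PySem.Str.join "" row]) []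
  let lines := (PySem.List.pyRange 0 size 1).foldl (fun acc col =>
    acc ++ [PySem.Str.join "" ((PySem.List.pyRange 0 size 1).map (fun row => pvCell grid row col))]) lines
  let lines := (PySem.List.pyRange (-(size - 1)) size 1).foldl (fun acc start =>
    let diag := (PySem.List.pyRange 0 size 1).foldl (fun d i =>
      if 0 ≤ i ∧ i < size ∧ 0 ≤ i - start ∧ i - start < size then d ++ [pvCell grid i (i - start)] else d) []
    if diag ≠ [] then acc ++ [PySem.Str.join "" diag] else acc) lines
  let lines := (PySem.List.pyRange 0 (2 * size - 1) 1).foldl (fun acc start =>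
    let diag := (PySem.List.pyRange 0 size 1).foldl (fun d i =>
      if 0 ≤ i ∧ i < size ∧ 0 ≤ start - i ∧ start - i < size then d ++ [pvCell grid i (start - i)] else d) []
    if diag ≠ [] then acc ++ [PySem.Str.join "" diag] else acc) lines
  lines

def pvLineHit (line : String) : Bool :=
  let backward := (PySem.Str.slice? line none none (-1)).getD ""
  pvBanned.any (fun banned => PySem.Str.isIn banned line || PySem.Str.isIn banned backward)

def contains_banned_word_py (grid : List (List String)) : Bool :=
  (pvExtractLines grid).any (fun line => pvLineHit line)

-- ===== PORT B =====
-- cols[i].append(x) (index always in range where B's Python returns)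
def pvAppendAt (xss : List (List String)) (i : Nat) (x : String) : List (List String) :=
  xss.set i (xss.getD i [] ++ [x])

-- the single nested pass over the cells (r, c then indexes into Nat lists; r - c + size - 1
-- is written r + (size - 1) - c, equal since c ≤ size - 1 whenever the cell is visited)
def pvBuckets (grid : List (List String)) (size : Nat) :
    List (List String) × List (List String) × List (List String) :=
  let nDiag := if size = 0 then 0 else 2 * size - 1
  (List.range size).foldl (fun st r =>
    let row := grid.getD r []
    (List.range size).foldl (fun st c =>
      let ch := row.getD c ""
      (pvAppendAt st.1 c ch,
       pvAppendAt st.2.1 (r + (size - 1) - c) ch,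
       pvAppendAt st.2.2 (r + c) ch)) st)
    (List.replicate size [], List.replicate nDiag [], List.replicate nDiag [])

def contains_banned_word_py_alt (grid : List (List String)) : Bool :=
  let size := grid.length
  let st := pvBuckets grid size
  let lines := grid.map (fun row => PySem.Str.join "" row)
  let lines := [st.1, st.2.1, st.2.2].foldl (fun acc group =>
    group.foldl (fun acc cells => acc ++ [PySem.Str.join "" cells]) acc) lines
  lines.any (fun line => pvBanned.any (fun banned =>
    PySem.Str.isIn banned line ||
    PySem.Str.isIn banned ((PySem.Str.slice? line none none (-1)).getD "")))

-- ===== PRECONDITION & SPEC =====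
-- Pre_ excludes exactly the grids on which A raises IndexError (some row shorter than
-- the number of rows); B's Python raises there too.
def Pre_contains_banned_word_py (grid : List (List String)) : Prop :=
  ∀ row ∈ grid, grid.length ≤ row.length
instance (grid : List (List String)) : Decidable (Pre_contains_banned_word_py grid) := by
  unfold Pre_contains_banned_word_py; infer_instance

def pvWitness_contains_banned_word_py : List (List String) :=
  [["C", "A"], ["T", "S"]]

def Spec_contains_banned_word_py (grid : List (List String)) (out : Bool) : Prop := out = contains_banned_word_py_alt grid
instance (grid : List (List String)) (out : Bool) : Decidable (Spec_contains_banned_word_py grid out) := by unfold Spec_contains_banned_word_py; infer_instance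

-- ===== CLAIM (what is proved, stated in full; the proofs are below) =====
def Claim_equal_contains_banned_word_py : Prop := ∀ (grid : List (List String)), Dom_contains_banned_word_py grid → Pre_contains_banned_word_py grid → Spec_contains_banned_word_py grid (contains_banned_word_py grid)

-- ===== LEMMAS AND PROOFS =====
theorem pvRange (a : Int) (k : Nat) : PySem.List.pyRange a (a + k) 1 = (List.range k).map (fun (j : Nat) => a + (j : Int)) := by
  induction k with
  | zero => simp [PySem.List.pyRange]
  | succ m ih =>
      rw [show a + ((m+1 : Nat) : Int) = (a + m) + 1 by push_cast; ring]
      rw [PySem.List.pyRange_one_succ_right (by omega), ih, List.range_succ]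
      simp

theorem pvAppendAt_getD (s : List (List String)) (i j : Nat) (x : String) (h : i < s.length) :
    (pvAppendAt s i x).getD j [] = s.getD j [] ++ (if i = j then [x] else []) := by
  unfold pvAppendAt
  split_ifs with hij
  · subst hij; simp [List.getD, List.getElem?_set_self, h]
  · simp [List.getD, List.getElem?_set_ne hij]

theorem pvAppendAt_length (s : List (List String)) (i : Nat) (x : String) :
    (pvAppendAt s i x).length = s.length := by simp [pvAppendAt]

theorem pvFoldAppendAt {β : Type} (l : List β) (idx : β → Nat) (v : β → String)
    (s : List (List String)) (hall : ∀ b ∈ l, idx b < s.length) :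
    l.foldl (fun acc b => pvAppendAt acc (idx b) (v b)) s
      = (List.range s.length).map
          (fun j => s.getD j [] ++ (l.filter (fun b => idx b == j)).map v) := by
  induction l generalizing s with
  | nil => simp; exact (List.ext_getElem (by simp) (by intro i h1 h2; simp [List.getD, List.getElem?_eq_getElem h2])).symm
  | cons b t ih =>
      rw [List.foldl_cons, ih _ (by intro b' hb'; rw [pvAppendAt_length]; exact hall b' (by simp [hb']))]
      rw [pvAppendAt_length]
      refine List.map_congr_left ?_
      intro j hj
      rw [pvAppendAt_getD _ _ _ _ (hall b (by simp))]
      by_cases h : idx b = j <;> simp [h]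

def pvCellN (grid : List (List String)) (r c : Nat) : String := (grid.getD r []).getD c ""

theorem pvFoldTriple {β α1 α2 α3 : Type} (l : List β) (f : α1 → β → α1) (g : α2 → β → α2)
    (h : α3 → β → α3) (x : α1) (y : α2) (z : α3) :
    l.foldl (fun st b => (f st.1 b, g st.2.1 b, h st.2.2 b)) (x, y, z)
      = (l.foldl f x, l.foldl g y, l.foldl h z) := by
  rw [PySem.List.foldl_prod_mk (f := f) (g := fun s2 b => (g s2.1 b, h s2.2 b)),
      PySem.List.foldl_prod_mk (f := g) (g := h)]

def pvCells (n : Nat) : List (Nat × Nat) :=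
  (List.range n).flatMap (fun r => (List.range n).map (fun c => (r, c)))

theorem pvDoubleFold (grid : List (List String)) (n m : Nat) (idx : Nat → Nat → Nat)
    (hall : ∀ r c, r < n → c < n → idx r c < m) :
    (List.range n).foldl (fun s r =>
        (List.range n).foldl (fun s c => pvAppendAt s (idx r c) ((grid.getD r []).getD c "")) s)
      (List.replicate m [])
    = (List.range m).map (fun j =>
        ((pvCells n).filter (fun p => idx p.1 p.2 == j)).map (fun p => pvCellN grid p.1 p.2)) := by
  have hmem : ∀ p ∈ pvCells n, (fun p : Nat × Nat => idx p.1 p.2) p < (List.replicate (m) ([] : List String)).length := by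
    intro p hp
    simp only [pvCells, List.mem_flatMap, List.mem_range, List.mem_map] at hp
    obtain ⟨r, hr, c, hc, rfl⟩ := hp
    simpa using hall r c hr hc
  refine Eq.trans (PySem.List.foldl_congr_mem (List.range n) _ (fun s r =>
      ((List.range n).map (fun c => (r, c))).foldl
        (fun s p => pvAppendAt s (idx p.1 p.2) ((grid.getD p.1 []).getD p.2 "")) s) _
      (fun acc x _ => (List.foldl_map (f := fun c => (x, c))
        (g := fun s p => pvAppendAt s (idx p.1 p.2) ((grid.getD p.1 []).getD p.2 ""))
        (l := List.range n) (init := acc)).symm)) ?_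
  refine Eq.trans (List.foldl_flatMap).symm ?_
  refine Eq.trans (pvFoldAppendAt (pvCells n) (fun p => idx p.1 p.2)
      (fun p => (grid.getD p.1 []).getD p.2 "") _ hmem) ?_
  simp [pvCellN]

theorem pvBuckets_eq (grid : List (List String)) (n : Nat) (hn : 0 < n) :
    pvBuckets grid n =
      ((List.range n).map (fun j => ((pvCells n).filter (fun p => p.2 == j)).map (fun p => pvCellN grid p.1 p.2)),
       (List.range (2 * n - 1)).map (fun j => ((pvCells n).filter (fun p => p.1 + (n - 1) - p.2 == j)).map (fun p => pvCellN grid p.1 p.2)),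
       (List.range (2 * n - 1)).map (fun j => ((pvCells n).filter (fun p => p.1 + p.2 == j)).map (fun p => pvCellN grid p.1 p.2))) := by
  unfold pvBuckets
  rw [if_neg (by omega)]
  refine Eq.trans (PySem.List.foldl_congr_mem (List.range n) _ (fun st r =>
      ((List.range n).foldl (fun s c => pvAppendAt s c ((grid.getD r []).getD c "")) st.1,
       (List.range n).foldl (fun s c => pvAppendAt s (r + (n - 1) - c) ((grid.getD r []).getD c "")) st.2.1,
       (List.range n).foldl (fun s c => pvAppendAt s (r + c) ((grid.getD r []).getD c "")) st.2.2)) _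
      (fun st r _ => pvFoldTriple (List.range n)
        (f := fun s c => pvAppendAt s c ((grid.getD r []).getD c ""))
        (g := fun s c => pvAppendAt s (r + (n - 1) - c) ((grid.getD r []).getD c ""))
        (h := fun s c => pvAppendAt s (r + c) ((grid.getD r []).getD c "")) st.1 st.2.1 st.2.2)) ?_
  refine Eq.trans (pvFoldTriple (List.range n)
      (f := fun s r => (List.range n).foldl (fun s c => pvAppendAt s c ((grid.getD r []).getD c "")) s)
      (g := fun s r => (List.range n).foldl (fun s c => pvAppendAt s (r + (n - 1) - c) ((grid.getD r []).getD c "")) s)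
      (h := fun s r => (List.range n).foldl (fun s c => pvAppendAt s (r + c) ((grid.getD r []).getD c "")) s)
      _ _ _) ?_
  refine congrArg₂ Prod.mk ?_ (congrArg₂ Prod.mk ?_ ?_)
  · exact pvDoubleFold grid n n (fun _ c => c) (fun _ _ _ hc => hc)
  · exact pvDoubleFold grid n (2 * n - 1) (fun r c => r + (n - 1) - c) (by intro r c hr hc; show r + (n - 1) - c < 2 * n - 1; omega)
  · exact pvDoubleFold grid n (2 * n - 1) (fun r c => r + c) (by intro r c hr hc; show r + c < 2 * n - 1; omega)

-- canonical per-line cell lists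
def pvLineCol (grid : List (List String)) (n c : Nat) : List String :=
  (List.range n).map (fun r => pvCellN grid r c)
def pvLineMain (grid : List (List String)) (n j : Nat) : List String :=
  (List.range n).flatMap (fun r =>
    if r ≤ j ∧ j ≤ r + (n - 1) then [pvCellN grid r (r + (n - 1) - j)] else [])
def pvLineAnti (grid : List (List String)) (n j : Nat) : List String :=
  (List.range n).flatMap (fun r =>
    if r ≤ j ∧ j - r < n then [pvCellN grid r (j - r)] else [])

theorem pvFlatMapCongr {α β : Type} (l : List α) (f g : α → List β)
    (h : ∀ x ∈ l, f x = g x) : l.flatMap f = l.flatMap g := by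
  simp only [List.flatMap_def]
  exact congrArg List.flatten (List.map_congr_left h)

theorem pvCellsFilter (n : Nat) (q : Nat × Nat → Bool) :
    (pvCells n).filter q
      = (List.range n).flatMap (fun r => ((List.range n).filter (fun c => q (r, c))).map (fun c => (r, c))) := by
  unfold pvCells
  rw [List.filter_flatMap]
  refine pvFlatMapCongr _ _ _ ?_
  intro r _
  exact List.filter_map (f := fun c => (r, c)) (p := q)

theorem pvFilterSingle (n c₀ : Nat) (p : Nat → Bool) (hc : c₀ < n)
    (hiff : ∀ c, c < n → (p c = true ↔ c = c₀)) : (List.range n).filter p = [c₀] := by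
  have hcg : ∀ c ∈ List.range n, p c = ((fun c => c == c₀) c) := by
    intro c hcm
    simp only [List.mem_range] at hcm
    by_cases h : p c
    · simp [h, ((hiff c hcm).1 h).symm]
    · simp only [Bool.not_eq_true] at h
      have hne : c ≠ c₀ := fun he => by simp [(hiff c hcm).2 he] at h
      simp [h, hne]
  rw [List.filter_congr hcg, List.filter_beq]
  simp [List.count_range, hc]

theorem pvFilterEmpty (n : Nat) (p : Nat → Bool) (h : ∀ c, c < n → p c = false) :
    (List.range n).filter p = [] := by
  rw [List.filter_eq_nil_iff]
  intro c hcm; simp only [List.mem_range] at hcm; simp [h c hcm]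

theorem pvColBucket (grid : List (List String)) (n j : Nat) (hj : j < n) :
    ((pvCells n).filter (fun p => p.2 == j)).map (fun p => pvCellN grid p.1 p.2)
      = pvLineCol grid n j := by
  rw [pvCellsFilter, List.map_flatMap]
  unfold pvLineCol
  rw [List.map_eq_flatMap (f := fun r => pvCellN grid r j)]
  refine pvFlatMapCongr _ _ _ ?_
  intro r _
  rw [pvFilterSingle n j _ hj (by intro c _; simp)]
  simp

theorem pvMainBucket (grid : List (List String)) (n j : Nat) (hn : 0 < n) :
    ((pvCells n).filter (fun p => p.1 + (n - 1) - p.2 == j)).map (fun p => pvCellN grid p.1 p.2)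
      = pvLineMain grid n j := by
  rw [pvCellsFilter, List.map_flatMap]
  unfold pvLineMain
  refine pvFlatMapCongr _ _ _ ?_
  intro r hr
  simp only [List.mem_range] at hr
  by_cases hcond : r ≤ j ∧ j ≤ r + (n - 1)
  · rw [pvFilterSingle n (r + (n - 1) - j) _ (by omega) (by intro c hc; simp; omega)]
    simp [hcond]
  · rw [pvFilterEmpty n _ (by intro c hc; simp; omega)]
    simp [hcond]

theorem pvAntiBucket (grid : List (List String)) (n j : Nat) (hn : 0 < n) :
    ((pvCells n).filter (fun p => p.1 + p.2 == j)).map (fun p => pvCellN grid p.1 p.2)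
      = pvLineAnti grid n j := by
  rw [pvCellsFilter, List.map_flatMap]
  unfold pvLineAnti
  refine pvFlatMapCongr _ _ _ ?_
  intro r hr
  simp only [List.mem_range] at hr
  by_cases hcond : r ≤ j ∧ j - r < n
  · rw [pvFilterSingle n (j - r) _ (by omega) (by intro c hc; simp; omega)]
    simp [hcond]
  · rw [pvFilterEmpty n _ (by intro c hc; simp; omega)]
    simp [hcond]

theorem pvRange0 (k : Nat) : PySem.List.pyRange 0 (k : Int) 1 = (List.range k).map (fun (j : Nat) => (j : Int)) := by
  simpa using pvRange 0 k

theorem pvCellCast (grid : List (List String)) (r c : Nat) :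
    pvCell grid (r : Int) (c : Int) = pvCellN grid r c := by
  simp [pvCell, pvCellN, PySem.List.pyGetD_natCast]

theorem pvFilterMapFlat {α β : Type} (l : List α) (p : α → Bool) (f : α → β) :
    (l.filter p).map f = l.flatMap (fun x => if p x then [f x] else []) := by
  induction l with
  | nil => rfl
  | cons h t ih => by_cases hp : p h <;> simp [hp, ih]

-- A's main-diagonal inner loop, in closed form
def pvDiagMainA (grid : List (List String)) (n : Nat) (s : Int) : List String :=
  (PySem.List.pyRange 0 (n : Int) 1).foldl (fun d i =>
    if 0 ≤ i ∧ i < (n : Int) ∧ 0 ≤ i - s ∧ i - s < (n : Int) then d ++ [pvCell grid i (i - s)] else d) []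
def pvDiagAntiA (grid : List (List String)) (n : Nat) (s : Int) : List String :=
  (PySem.List.pyRange 0 (n : Int) 1).foldl (fun d i =>
    if 0 ≤ i ∧ i < (n : Int) ∧ 0 ≤ s - i ∧ s - i < (n : Int) then d ++ [pvCell grid i (s - i)] else d) []

theorem pvDiagMainA_eq (grid : List (List String)) (n j : Nat) (hn : 0 < n) (hj : j < 2 * n - 1) :
    pvDiagMainA grid n (-((n : Int) - 1) + (j : Int)) = pvLineMain grid n j := by
  unfold pvDiagMainA
  rw [PySem.List.foldl_append_ite, pvRange0, pvFilterMapFlat, List.flatMap_map]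
  unfold pvLineMain
  rw [List.nil_append]
  refine pvFlatMapCongr _ _ _ ?_
  intro r hr
  simp only [List.mem_range] at hr
  by_cases hcond : r ≤ j ∧ j ≤ r + (n - 1)
  · obtain ⟨h1, h2⟩ := hcond
    rw [if_pos (by simp only [decide_eq_true_eq]; push_cast; omega), if_pos ⟨h1, h2⟩]
    have hc : (r : Int) - (-((n : Int) - 1) + (j : Int)) = ((r + (n - 1) - j : Nat) : Int) := by omega
    rw [hc, pvCellCast]
  · rw [if_neg (by simp only [decide_eq_true_eq]; push_cast; omega), if_neg hcond]

theorem pvDiagAntiA_eq (grid : List (List String)) (n j : Nat) (hn : 0 < n) (hj : j < 2 * n - 1) :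
    pvDiagAntiA grid n (j : Int) = pvLineAnti grid n j := by
  unfold pvDiagAntiA
  rw [PySem.List.foldl_append_ite, pvRange0, pvFilterMapFlat, List.flatMap_map]
  unfold pvLineAnti
  rw [List.nil_append]
  refine pvFlatMapCongr _ _ _ ?_
  intro r hr
  simp only [List.mem_range] at hr
  by_cases hcond : r ≤ j ∧ j - r < n
  · obtain ⟨h1, h2⟩ := hcond
    rw [if_pos (by simp only [decide_eq_true_eq]; push_cast; omega), if_pos ⟨h1, h2⟩]
    have hc : (j : Int) - (r : Int) = ((j - r : Nat) : Int) := by omega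
    rw [hc, pvCellCast]
  · rw [if_neg (by simp only [decide_eq_true_eq]; push_cast; omega), if_neg hcond]

theorem pvLineMain_ne (grid : List (List String)) (n j : Nat) (hn : 0 < n) (hj : j < 2 * n - 1) :
    pvLineMain grid n j ≠ [] := by
  apply List.ne_nil_of_mem (a := pvCellN grid (min j (n - 1)) (min j (n - 1) + (n - 1) - j))
  unfold pvLineMain
  rw [List.mem_flatMap]
  refine ⟨min j (n - 1), by simp; omega, ?_⟩
  rw [if_pos (by omega)]
  simp

theorem pvLineAnti_ne (grid : List (List String)) (n j : Nat) (hn : 0 < n) (hj : j < 2 * n - 1) :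
    pvLineAnti grid n j ≠ [] := by
  apply List.ne_nil_of_mem (a := pvCellN grid (min j (n - 1)) (j - min j (n - 1)))
  unfold pvLineAnti
  rw [List.mem_flatMap]
  refine ⟨min j (n - 1), by simp; omega, ?_⟩
  rw [if_pos (by omega)]
  simp

theorem pvMainFold (grid : List (List String)) (n : Nat) (hn : 0 < n) (init : List String) :
    (PySem.List.pyRange (-((n : Int) - 1)) (n : Int) 1).foldl (fun acc start =>
        if pvDiagMainA grid n start ≠ [] then acc ++ [PySem.Str.join "" (pvDiagMainA grid n start)] else acc) init
      = init ++ (List.range (2 * n - 1)).map (fun j => PySem.Str.join "" (pvLineMain grid n j)) := by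
  have hrange : PySem.List.pyRange (-((n : Int) - 1)) (n : Int) 1
      = (List.range (2 * n - 1)).map (fun (j : Nat) => -((n : Int) - 1) + (j : Int)) := by
    have h2 := pvRange (-((n : Int) - 1)) (2 * n - 1)
    rw [show -((n : Int) - 1) + ((2 * n - 1 : Nat) : Int) = (n : Int) by omega] at h2
    exact h2
  rw [hrange, List.foldl_map]
  refine Eq.trans (PySem.List.foldl_congr_mem (List.range (2 * n - 1)) _
      (fun acc j => acc ++ [PySem.Str.join "" (pvLineMain grid n j)]) init ?_)
      (PySem.List.foldl_append_singleton_eq_map _ _ _)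
  intro acc j hj
  simp only [List.mem_range] at hj
  rw [pvDiagMainA_eq grid n j hn hj]
  rw [if_pos (pvLineMain_ne grid n j hn hj)]

theorem pvAntiFold (grid : List (List String)) (n : Nat) (hn : 0 < n) (init : List String) :
    (PySem.List.pyRange 0 (2 * (n : Int) - 1) 1).foldl (fun acc start =>
        if pvDiagAntiA grid n start ≠ [] then acc ++ [PySem.Str.join "" (pvDiagAntiA grid n start)] else acc) init
      = init ++ (List.range (2 * n - 1)).map (fun j => PySem.Str.join "" (pvLineAnti grid n j)) := by
  have hrange : PySem.List.pyRange 0 (2 * (n : Int) - 1) 1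
      = (List.range (2 * n - 1)).map (fun (j : Nat) => (j : Int)) := by
    rw [show 2 * (n : Int) - 1 = ((2 * n - 1 : Nat) : Int) by omega]
    exact pvRange0 (2 * n - 1)
  rw [hrange, List.foldl_map]
  refine Eq.trans (PySem.List.foldl_congr_mem (List.range (2 * n - 1)) _
      (fun acc j => acc ++ [PySem.Str.join "" (pvLineAnti grid n j)]) init ?_)
      (PySem.List.foldl_append_singleton_eq_map _ _ _)
  intro acc j hj
  simp only [List.mem_range] at hj
  rw [pvDiagAntiA_eq grid n j hn hj]
  rw [if_pos (pvLineAnti_ne grid n j hn hj)]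

def pvCanonLines (grid : List (List String)) : List String :=
  grid.map (fun row => PySem.Str.join "" row)
  ++ (List.range grid.length).map (fun c => PySem.Str.join "" (pvLineCol grid grid.length c))
  ++ (List.range (2 * grid.length - 1)).map (fun j => PySem.Str.join "" (pvLineMain grid grid.length j))
  ++ (List.range (2 * grid.length - 1)).map (fun j => PySem.Str.join "" (pvLineAnti grid grid.length j))

theorem pvExtractLines_eq (grid : List (List String)) (hn : 0 < grid.length) :
    pvExtractLines grid = pvCanonLines grid := by
  have h0 : pvExtractLines grid =
      (PySem.List.pyRange 0 (2 * (grid.length : Int) - 1) 1).foldl (fun acc start =>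
        if pvDiagAntiA grid grid.length start ≠ [] then
          acc ++ [PySem.Str.join "" (pvDiagAntiA grid grid.length start)] else acc)
      ((PySem.List.pyRange (-((grid.length : Int) - 1)) (grid.length : Int) 1).foldl (fun acc start =>
        if pvDiagMainA grid grid.length start ≠ [] then
          acc ++ [PySem.Str.join "" (pvDiagMainA grid grid.length start)] else acc)
      ((PySem.List.pyRange 0 (grid.length : Int) 1).foldl (fun acc col =>
        acc ++ [PySem.Str.join "" ((PySem.List.pyRange 0 (grid.length : Int) 1).map (fun row => pvCell grid row col))])
      (grid.foldl (fun acc row => acc ++ [PySem.Str.join "" row]) []))) := rfl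
  rw [h0, pvAntiFold grid grid.length hn, pvMainFold grid grid.length hn,
      PySem.List.foldl_append_singleton_eq_map, PySem.List.foldl_append_singleton_eq_map]
  unfold pvCanonLines
  rw [List.nil_append, pvRange0, List.map_map]
  simp only [List.append_assoc]
  congr 1
  congr 1
  refine List.map_congr_left ?_
  intro c hc
  simp only [Function.comp_apply]
  rw [List.map_map]
  exact congrArg (PySem.Str.join "")
    (List.map_congr_left (fun r _ => pvCellCast grid r c))

theorem pvAltLines (grid : List (List String)) (hn : 0 < grid.length) :
    contains_banned_word_py_alt grid = (pvCanonLines grid).any (fun line => pvLineHit line) := by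
  unfold contains_banned_word_py_alt
  dsimp only
  rw [pvBuckets_eq grid grid.length hn]
  dsimp only
  simp only [List.foldl_cons, List.foldl_nil]
  rw [PySem.List.foldl_append_singleton_eq_map, PySem.List.foldl_append_singleton_eq_map,
      PySem.List.foldl_append_singleton_eq_map]
  unfold pvCanonLines
  rw [List.map_map, List.map_map, List.map_map]
  simp only [List.append_assoc]
  have hcols : ∀ c ∈ List.range grid.length,
      (PySem.Str.join "" ∘ fun j =>
        ((pvCells grid.length).filter (fun p => p.2 == j)).map (fun p => pvCellN grid p.1 p.2)) c
      = PySem.Str.join "" (pvLineCol grid grid.length c) := by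
    intro c hc
    simp only [List.mem_range] at hc
    exact congrArg (PySem.Str.join "") (pvColBucket grid grid.length c hc)
  have hmains : ∀ j ∈ List.range (2 * grid.length - 1),
      (PySem.Str.join "" ∘ fun j =>
        ((pvCells grid.length).filter (fun p => p.1 + (grid.length - 1) - p.2 == j)).map (fun p => pvCellN grid p.1 p.2)) j
      = PySem.Str.join "" (pvLineMain grid grid.length j) := by
    intro j hj
    exact congrArg (PySem.Str.join "") (pvMainBucket grid grid.length j hn)
  have hantis : ∀ j ∈ List.range (2 * grid.length - 1),
      (PySem.Str.join "" ∘ fun j =>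
        ((pvCells grid.length).filter (fun p => p.1 + p.2 == j)).map (fun p => pvCellN grid p.1 p.2)) j
      = PySem.Str.join "" (pvLineAnti grid grid.length j) := by
    intro j hj
    exact congrArg (PySem.Str.join "") (pvAntiBucket grid grid.length j hn)
  rw [List.map_congr_left hcols, List.map_congr_left hmains, List.map_congr_left hantis]
  rfl

theorem pvMainEq (grid : List (List String)) :
    contains_banned_word_py grid = contains_banned_word_py_alt grid := by
  by_cases hg : grid = []
  · subst hg; rfl
  · have hn : 0 < grid.length := List.length_pos_iff.mpr hg
    unfold contains_banned_word_py
    rw [pvExtractLines_eq grid hn, pvAltLines grid hn]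

-- ===== VERDICT (by name: the statement is the Claim_ definition above) =====
theorem contains_banned_word_py_spec : Claim_equal_contains_banned_word_py := by
  intro grid _ _
  unfold Spec_contains_banned_word_py
  exact pvMainEq grid
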